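-- pv_equiv track=rewrite | github.com/peteroupc/peteroupc.github.io | randomgen.py | _getSolTableForRanges
-- ===== SOURCE A (Python) =====
-- def _getSolTableForRanges(ranges, adjsum):
--     n = len(ranges)
--     t = [[0 for i in range(adjsum + 1)] for j in range(n + 1)]
--     t[0][0] = 1
--     for i in range(1, n + 1):
--         for j in range(0, adjsum + 1):
--             krange = ranges[i - 1][1] - ranges[i - 1][0]
--             jm = max(j - krange, 0)
--             v = 0
--             for k in range(jm, j + 1):
--                 v += t[i - 1][k]
--             t[i][j] = v
--     return t
-- ===== SOURCE B (Python) =====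
-- def _getSolTableForRanges(ranges, adjsum):
--     m = adjsum + 1
--     row = [1] + [0] * adjsum
--     table = [row]
--     for lo, hi in ranges:
--         krange = hi - lo
--         pre = [0]
--         for x in row:
--             pre.append(pre[-1] + x)
--         row = [pre[j + 1] - pre[min(max(j - krange, 0), j + 1)] for j in range(m)]
--         table.append(row)
--     return table
-- ===== Notes on version B (the rewrite author's own statement) =====
-- stated objective: faster
-- what changed: Each DP row is computed from a once-built prefix-sum array of the previous row, so the inner window sum becomes one subtraction instead of a k-loop; the table is grown by appending rows instead of mutating a preallocated zero table.
import Mathlib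
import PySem

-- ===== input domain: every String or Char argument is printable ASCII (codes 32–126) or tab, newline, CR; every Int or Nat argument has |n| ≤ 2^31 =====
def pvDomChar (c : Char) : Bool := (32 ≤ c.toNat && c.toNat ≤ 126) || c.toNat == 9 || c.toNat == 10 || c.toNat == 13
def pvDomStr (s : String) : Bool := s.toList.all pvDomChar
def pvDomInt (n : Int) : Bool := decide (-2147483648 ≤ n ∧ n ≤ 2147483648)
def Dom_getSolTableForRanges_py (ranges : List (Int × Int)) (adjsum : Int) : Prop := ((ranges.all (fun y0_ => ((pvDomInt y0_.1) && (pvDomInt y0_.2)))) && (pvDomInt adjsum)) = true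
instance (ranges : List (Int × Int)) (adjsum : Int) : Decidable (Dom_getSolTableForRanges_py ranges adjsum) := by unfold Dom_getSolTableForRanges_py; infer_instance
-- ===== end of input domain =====

-- B replaces A's inner O(krange) window-sum loop by a prefix-sum array per row (one subtraction per cell)
-- and grows the table by appending rows; objective: faster (asymptotic: O(n*adjsum) vs O(n*adjsum*krange)).

-- ===== PORT A =====
def getSolTableForRanges_py (ranges : List (Int × Int)) (adjsum : Int) : List (List Int) :=
  let n : Int := ranges.length
  let zrow : List Int := List.replicate (adjsum + 1).toNat 0
  let t0 : List (List Int) := List.replicate (n + 1).toNat zrow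
  let t1 : List (List Int) := t0.set 0 (zrow.set 0 1)
  (PySem.List.pyRange 1 (n + 1) 1).foldl (fun t i =>
    t.set i.toNat ((PySem.List.pyRange 0 (adjsum + 1) 1).map (fun j =>
      let krange := (PySem.List.pyGetD ranges (i - 1) (0, 0)).2 -
                    (PySem.List.pyGetD ranges (i - 1) (0, 0)).1
      let jm := max (j - krange) 0
      (PySem.List.pyRange jm (j + 1) 1).foldl (fun v k =>
        v + PySem.List.pyGetD (PySem.List.pyGetD t (i - 1) []) k 0) 0))) t1

-- ===== PORT B =====
-- one row of B: prefix sums `pre` of the previous row, then each cell is one subtraction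
def pvBRow (prev : List Int) (krange : Int) (adjsum : Int) : List Int :=
  let pre : List Int := prev.foldl (fun p x => p ++ [PySem.List.pyGetD p (-1) 0 + x]) [0]
  (PySem.List.pyRange 0 (adjsum + 1) 1).map (fun j =>
    PySem.List.pyGetD pre (j + 1) 0 -
      PySem.List.pyGetD pre (min (max (j - krange) 0) (j + 1)) 0)

def getSolTableForRanges_py_alt (ranges : List (Int × Int)) (adjsum : Int) : List (List Int) :=
  let row0 : List Int := 1 :: List.replicate adjsum.toNat 0
  (ranges.foldl (fun (st : List Int × List (List Int)) lh =>
      let row := pvBRow st.1 (lh.2 - lh.1) adjsum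
      (row, st.2 ++ [row])) (row0, [row0])).2

-- ===== PRECONDITION & SPEC =====
-- Pre_ excludes adjsum < 0, where A's rows are empty and t[0][0] = 1 raises IndexError.
def Pre_getSolTableForRanges_py (ranges : List (Int × Int)) (adjsum : Int) : Prop :=
  0 ≤ adjsum
instance (ranges : List (Int × Int)) (adjsum : Int) : Decidable (Pre_getSolTableForRanges_py ranges adjsum) := by
  unfold Pre_getSolTableForRanges_py; infer_instance

def pvWitness_getSolTableForRanges_py : (List (Int × Int)) × Int := ([(0, 2), (1, 1)], 3)

def Spec_getSolTableForRanges_py (ranges : List (Int × Int)) (adjsum : Int) (out : List (List Int)) : Prop := out = getSolTableForRanges_py_alt ranges adjsum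
instance (ranges : List (Int × Int)) (adjsum : Int) (out : List (List Int)) : Decidable (Spec_getSolTableForRanges_py ranges adjsum out) := by unfold Spec_getSolTableForRanges_py; infer_instance

-- ===== CLAIM (what is proved, stated in full; the proofs are below) =====
def Claim_equal_getSolTableForRanges_py : Prop := ∀ (ranges : List (Int × Int)) (adjsum : Int), Dom_getSolTableForRanges_py ranges adjsum → Pre_getSolTableForRanges_py ranges adjsum → Spec_getSolTableForRanges_py ranges adjsum (getSolTableForRanges_py ranges adjsum)

-- ===== LEMMAS AND PROOFS =====

-- B's rows after a given state: rows generated from `r` by the ranges `rs`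
def pvBRows (adjsum : Int) : List (Int × Int) → List Int → List (List Int)
  | [], _ => []
  | lh :: rs, r =>
    let row := pvBRow r (lh.2 - lh.1) adjsum
    row :: pvBRows adjsum rs row

-- B's fold unfolds to pvBRows
theorem pvB_fold (adjsum : Int) (rs : List (Int × Int)) (r : List Int) (acc : List (List Int)) :
    (rs.foldl (fun (st : List Int × List (List Int)) lh =>
      let row := pvBRow st.1 (lh.2 - lh.1) adjsum
      (row, st.2 ++ [row])) (r, acc)).2 = acc ++ pvBRows adjsum rs r := by
  induction rs generalizing r acc with
  | nil => simp [pvBRows]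
  | cons lh rs ih => simp [pvBRows, ih, List.append_assoc]

-- the prefix loop of B builds List.scanl (·+·)
theorem pvPre_fold (l : List Int) (p : List Int) (a : Int) :
    l.foldl (fun p x => p ++ [PySem.List.pyGetD p (-1) 0 + x]) (p ++ [a])
      = p ++ List.scanl (· + ·) a l := by
  induction l generalizing p a with
  | nil => simp [List.scanl_nil]
  | cons x l ih =>
    simp only [List.foldl_cons, PySem.List.pyGetD_neg_one_append_singleton]
    rw [ih (p ++ [a]) (a + x), List.scanl_cons]
    simp

theorem pvScanl_getD (l : List Int) (a : Int) (k : Nat) (hk : k ≤ l.length) :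
    (List.scanl (· + ·) a l).getD k 0 = a + (l.take k).sum := by
  induction l generalizing a k with
  | nil =>
    have : k = 0 := by simpa using hk
    subst this
    simp [List.scanl_nil]
  | cons x l ih =>
    cases k with
    | zero => simp [List.scanl_cons]
    | succ k =>
      simp only [List.scanl_cons, List.getD_cons_succ, List.take_succ_cons, List.sum_cons]
      rw [ih (a + x) k (by simpa using hk)]
      ring

-- A's inner window-sum loop as a difference of partial sums
theorem pvSumRange (l : List Int) (a b v : Int) (ha : 0 ≤ a) (hab : a ≤ b) (hb : b ≤ l.length) :
    (PySem.List.pyRange a b 1).foldl (fun v k => v + PySem.List.pyGetD l k 0) v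
      = v + ((l.take b.toNat).sum - (l.take a.toNat).sum) := by
  have h : ∀ (m : Nat) (a v : Int), 0 ≤ a → a ≤ b → b ≤ l.length → (b - a).toNat = m →
      (PySem.List.pyRange a b 1).foldl (fun v k => v + PySem.List.pyGetD l k 0) v
        = v + ((l.take b.toNat).sum - (l.take a.toNat).sum) := by
    intro m
    induction m with
    | zero =>
      intro a v ha hab hb hm
      have : a = b := by omega
      subst this
      rw [PySem.List.pyRange_one_eq_nil le_rfl]
      simp
    | succ m ih =>
      intro a v ha hab hb hm
      have hlt : a < b := by omega
      rw [PySem.List.pyRange_one_cons hlt, List.foldl_cons]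
      rw [ih (a + 1) _ (by omega) (by omega) hb (by omega)]
      have hget : PySem.List.pyGetD l a 0 = l[a.toNat]'(by omega) := by
        exact PySem.List.pyGetD_eq_getElem l 0 ha (by omega)
      have htake : (l.take (a + 1).toNat).sum = (l.take a.toNat).sum + l[a.toNat]'(by omega) := by
        have h1 : (a + 1).toNat = a.toNat + 1 := by omega
        rw [h1, List.sum_take_succ l a.toNat (by omega)]
      rw [hget, htake]
      ring
  exact h (b - a).toNat a v ha hab hb rfl

-- the per-row equality: A's row map = B's row map, given the previous row has length adjsum+1
theorem pvRow_eq (prev : List Int) (krange adjsum : Int) (hadj : 0 ≤ adjsum)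
    (hlen : prev.length = (adjsum + 1).toNat) :
    (PySem.List.pyRange 0 (adjsum + 1) 1).map (fun j =>
      let jm := max (j - krange) 0
      (PySem.List.pyRange jm (j + 1) 1).foldl (fun v k =>
        v + PySem.List.pyGetD prev k 0) 0)
      = pvBRow prev krange adjsum := by
  unfold pvBRow
  have hpre : prev.foldl (fun p x => p ++ [PySem.List.pyGetD p (-1) 0 + x]) [0]
      = List.scanl (· + ·) 0 prev := by
    have := pvPre_fold prev [] 0
    simpa using this
  rw [hpre]
  apply List.map_congr_left
  intro j hj
  dsimp only
  rw [PySem.List.mem_pyRange_one] at hj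
  obtain ⟨hj0, hjb⟩ := hj
  have hlenscan : (List.scanl (· + ·) 0 prev).length = prev.length + 1 := by
    simp [List.length_scanl]
  have hgetpre : ∀ (i : Int), 0 ≤ i → i ≤ (prev.length : Int) →
      PySem.List.pyGetD (List.scanl (· + ·) 0 prev) i 0 = (prev.take i.toNat).sum := by
    intro i hi0 hile
    rw [PySem.List.pyGetD_eq_getElem _ 0 hi0 (by omega)]
    have := pvScanl_getD prev 0 i.toNat (by omega)
    rw [List.getD_eq_getElem _ _ (by omega)] at this
    simpa using this
  set jm := max (j - krange) 0 with hjm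
  have hjm0 : 0 ≤ jm := le_max_right _ _
  by_cases hcase : jm ≤ j
  · rw [pvSumRange prev jm (j + 1) 0 hjm0 (by omega) (by omega)]
    rw [hgetpre (j + 1) (by omega) (by omega)]
    have : min jm (j + 1) = jm := by omega
    rw [this, hgetpre jm hjm0 (by omega)]
    ring
  · rw [PySem.List.pyRange_one_eq_nil (by omega)]
    have : min jm (j + 1) = j + 1 := by omega
    rw [this]
    simp

-- splitting a set at the boundary of the prefix
theorem pvSet_append (xs : List (List Int)) (y : List Int) (ys : List (List Int)) (v : List Int) :
    (xs ++ y :: ys).set xs.length v = xs ++ v :: ys := by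
  induction xs with
  | nil => simp
  | cons x xs ih => simp [ih]

-- reading the last element of the prefix through pyGetD
theorem pvGet_last (xs : List (List Int)) (ys : List (List Int)) (h : xs ≠ []) :
    PySem.List.pyGetD (xs ++ ys) ((xs.length : Int) - 1) [] = xs.getLast h := by
  have hlen : 0 < xs.length := List.length_pos_iff.mpr h
  have hidx : ((xs.length : Int) - 1).toNat = xs.length - 1 := by omega
  rw [PySem.List.pyGetD_of_nonneg _ [] (by omega), hidx,
    List.getD_eq_getElem _ _ (by simp; omega), List.getElem_append_left (by omega),
    List.getLast_eq_getElem h]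

-- the main table invariant: A's fold from a prefix equals the prefix plus B's rows
theorem pvTable_inv (ranges : List (Int × Int)) (adjsum : Int) (hadj : 0 ≤ adjsum)
    (rs : List (Int × Int)) :
    ∀ (pref : List (List Int)) (i : Int) (h : pref ≠ []),
      (pref.length : Int) = i →
      ranges.drop (i - 1).toNat = rs →
      1 ≤ i →
      (pref.getLast h).length = (adjsum + 1).toNat →
      (PySem.List.pyRange i (i + rs.length) 1).foldl (fun t i =>
        t.set i.toNat ((PySem.List.pyRange 0 (adjsum + 1) 1).map (fun j =>
          let krange := (PySem.List.pyGetD ranges (i - 1) (0, 0)).2 -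
                        (PySem.List.pyGetD ranges (i - 1) (0, 0)).1
          let jm := max (j - krange) 0
          (PySem.List.pyRange jm (j + 1) 1).foldl (fun v k =>
            v + PySem.List.pyGetD (PySem.List.pyGetD t (i - 1) []) k 0) 0)))
        (pref ++ List.replicate rs.length (List.replicate (adjsum + 1).toNat 0))
      = pref ++ pvBRows adjsum rs (pref.getLast h) := by
  induction rs with
  | nil =>
    intro pref i h hlen hdrop hi hlast
    simp only [List.length_nil, Nat.cast_zero, add_zero, List.replicate_zero]
    rw [PySem.List.pyRange_one_eq_nil le_rfl]
    simp [pvBRows]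
  | cons lh rs ih =>
    intro pref i h hlen hdrop hi hlast
    have hcons : PySem.List.pyRange i (i + ((lh :: rs).length : Int)) 1
        = i :: PySem.List.pyRange (i + 1) (i + ((lh :: rs).length : Int)) 1 := by
      apply PySem.List.pyRange_one_cons
      simp
    rw [hcons, List.foldl_cons]
    have hi1 : (i - 1).toNat < ranges.length := by
      have : ranges.length - (i-1).toNat = (lh :: rs).length := by
        rw [← hdrop]; simp
      simp at this; omega
    have hgetr : PySem.List.pyGetD ranges (i - 1) (0, 0) = lh := by
      rw [PySem.List.pyGetD_eq_getElem ranges (0, 0) (by omega) (by omega)]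
      have h2 : (List.drop (i - 1).toNat ranges).head? = ranges[(i - 1).toNat]? :=
        List.head?_drop
      rw [hdrop, List.getElem?_eq_getElem hi1] at h2
      simpa using h2.symm
    -- the table argument seen inside the first step
    have hsplit : pref ++ List.replicate ((lh :: rs).length) (List.replicate (adjsum + 1).toNat 0)
        = pref ++ (List.replicate (adjsum + 1).toNat 0) ::
            List.replicate rs.length (List.replicate (adjsum + 1).toNat 0) := by
      simp [List.replicate_succ]
    have hgetprev : PySem.List.pyGetD
        (pref ++ List.replicate ((lh :: rs).length) (List.replicate (adjsum + 1).toNat 0)) (i - 1) []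
        = pref.getLast h := by
      have := pvGet_last pref (List.replicate ((lh :: rs).length) (List.replicate (adjsum + 1).toNat 0)) h
      rw [hlen] at this
      exact this
    have hrow : (PySem.List.pyRange 0 (adjsum + 1) 1).map (fun j =>
          let krange := (PySem.List.pyGetD ranges (i - 1) (0, 0)).2 -
                        (PySem.List.pyGetD ranges (i - 1) (0, 0)).1
          let jm := max (j - krange) 0
          (PySem.List.pyRange jm (j + 1) 1).foldl (fun v k =>
            v + PySem.List.pyGetD (PySem.List.pyGetD
              (pref ++ List.replicate ((lh :: rs).length) (List.replicate (adjsum + 1).toNat 0))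
              (i - 1) []) k 0) 0)
        = pvBRow (pref.getLast h) (lh.2 - lh.1) adjsum := by
      rw [hgetprev, hgetr]
      exact pvRow_eq (pref.getLast h) (lh.2 - lh.1) adjsum hadj hlast
    rw [hrow]
    have hset : (pref ++ List.replicate ((lh :: rs).length)
          (List.replicate (adjsum + 1).toNat 0)).set i.toNat
          (pvBRow (pref.getLast h) (lh.2 - lh.1) adjsum)
        = (pref ++ [pvBRow (pref.getLast h) (lh.2 - lh.1) adjsum]) ++
            List.replicate rs.length (List.replicate (adjsum + 1).toNat 0) := by
      rw [hsplit]
      have : i.toNat = pref.length := by omega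
      rw [this, pvSet_append]
      simp
    rw [hset]
    have hne : pref ++ [pvBRow (pref.getLast h) (lh.2 - lh.1) adjsum] ≠ [] := by simp
    have hlast' : (pref ++ [pvBRow (pref.getLast h) (lh.2 - lh.1) adjsum]).getLast hne
        = pvBRow (pref.getLast h) (lh.2 - lh.1) adjsum := by
      simp
    have hrec := ih (pref ++ [pvBRow (pref.getLast h) (lh.2 - lh.1) adjsum]) (i + 1) hne
      (by simp; omega)
      (by
        have : (i + 1 - 1).toNat = (i - 1).toNat + 1 := by omega
        rw [this, ← List.drop_drop, hdrop]
        simp)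
      (by omega)
      (by
        rw [hlast']
        unfold pvBRow
        simp [PySem.List.length_pyRange_one])
    have harr : i + ((lh :: rs).length : Int) = (i + 1) + (rs.length : Int) := by
      simp; omega
    rw [harr, hrec, hlast']
    simp [pvBRows, List.append_assoc]

-- ===== VERDICT (by name: the statement is the Claim_ definition above) =====
theorem getSolTableForRanges_py_spec : Claim_equal_getSolTableForRanges_py := by
  intro ranges adjsum _hdom hpre
  unfold Spec_getSolTableForRanges_py getSolTableForRanges_py getSolTableForRanges_py_alt
  have hadj : 0 ≤ adjsum := hpre
  have hm : (adjsum + 1).toNat = adjsum.toNat + 1 := by omega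
  have hrow0 : (List.replicate (adjsum + 1).toNat (0 : Int)).set 0 1
      = 1 :: List.replicate adjsum.toNat 0 := by
    rw [hm, List.replicate_succ]
    simp
  have ht1 : (List.replicate ((ranges.length : Int) + 1).toNat
        (List.replicate (adjsum + 1).toNat (0 : Int))).set 0
        ((List.replicate (adjsum + 1).toNat (0 : Int)).set 0 1)
      = (1 :: List.replicate adjsum.toNat 0) ::
          List.replicate ranges.length (List.replicate (adjsum + 1).toNat 0) := by
    have : ((ranges.length : Int) + 1).toNat = ranges.length + 1 := by omega
    rw [this, List.replicate_succ, hrow0]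
    simp
  rw [pvB_fold]
  simp only [ht1]
  have hne : ([1 :: List.replicate adjsum.toNat (0 : Int)] : List (List Int)) ≠ [] := by simp
  have := pvTable_inv ranges adjsum hadj ranges
    [1 :: List.replicate adjsum.toNat 0] 1 hne (by simp) (by simp) le_rfl
    (by simp [hm])
  simp only [List.getLast_singleton] at this
  have harr : (1 : Int) + (ranges.length : Int) = (ranges.length : Int) + 1 := by ring
  rw [harr] at this
  simpa using this
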